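-- pv_equiv track=rewrite | github.com/k3ap/integrator | integrator/model.py | predelaj_niz_za_latex
-- ===== SOURCE A (Python) =====
-- import string
--
-- def predelaj_niz_za_latex(niz):
--     """Polepšaj niz, da bo bolje izgledal v latex-u"""
--
--     # Zamenjave, ki jih program opravi.
--     # (ime_funkcije, leva_zamenjava, desna_zamenjava)
--     # Izjema tu je zadnji vnos; prazno ime_funkcije pomeni, da bo zamenjal katerekoli oklepaje
--     # Dodatni oklepaji okoli vseh funkcij so tam zato, da se `... ^ (funkcija)` pravilno pokaže
--     SUBSTITUCIJE = [
--         ("abs", "{\\left|", "\\right|}"),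
--         ("acos", "{\\arccos{(", ")}}"),
--         ("arccos", "{\\arccos{(", ")}}"),
--         ("asin", "{\\arcsin{(", ")}}"),
--         ("arcsin", "{\\arcsin{(", ")}}"),
--         ("atan", "{\\arctan{(", ")}}"),
--         ("arctan", "{\\arctan{(", ")}}"),
--         ("cos", "{\\cos{(", ")}}"),
--         ("cosh", "{\\cosh{(", ")}}"),
--         ("exp", "{\\exp{(", ")}}"),
--         ("log", "{\\log{(", ")}}"),
--         ("ln", "{\\ln{(", ")}}"),
--         ("sin", "{\\sin{(", ")}}"),
--         ("sinh", "{\\sinh{(", ")}}"),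
--         ("sqrt", "{\\sqrt{", "}}"),
--         ("tan", "{\\tan{(", ")}}"),
--         ("tanh", "{\\tanh{(", ")}}"),
--         ("log10", "{\\log_{10}{(", ")}}"),
--         ("log2", "{\\log_2{(", ")}}"),
--         ("", "{(", ")}"),
--     ]
--
--     # Poiščemo oklepaje, in si označimo, kje se začnejo, končajo, in katera funkcija je pred njimi
--     oklepaji = []  # Sklad parov (ime_funkcije, indeks_oklepaja)
--     pari_oklepajev = []  # Seznam trojic (ime_funkcije, indeks_levega, indeks_desnega)
--     ime_funkcije = ""
--     for i, ch in enumerate(niz):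
--         if ch in string.ascii_letters + string.digits:
--             ime_funkcije += ch
--         elif ch == "(":
--             oklepaji.append((ime_funkcije, i))
--             ime_funkcije = ""
--         elif ch == ")":
--             if not oklepaji:
--                 # Nekaj je šlo hudo narobe; to se res nebi smelo zgoditi na tej točki
--                 raise ValueError("Malformed oklepaji v nizu")
--             ime, indeks = oklepaji.pop()
--             pari_oklepajev.append((ime, indeks, i))
--             ime_funkcije = ""
--         else:
--             ime_funkcije = ""
--
--     # Sedaj zaupamo, da ne manjka noben zaklepaj; sicer bi se parser moral že zdavnaj pritožiti
--
--     zamenjave = []  # (kje se začne zamenjava, koliko za zamenjati, s čim zamenjati)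
--     for ime, levi, desni in pari_oklepajev:
--         for ime_za_zamenjavo, leva_zamenjava, desna_zamenjava in SUBSTITUCIJE:
--             if ime_za_zamenjavo == ime:
--                 break
--         else:
--             # Če nismo našli prave substitucije, pustimo ime funkcije, kakršno je
--             # Primer tega je npr. funkcija floor()
--             continue
--
--         zamenjave.append((levi-len(ime), len(ime)+1, leva_zamenjava))
--         zamenjave.append((desni, 1, desna_zamenjava))
--
--     zamenjave.sort()
--     indeks = 0  # indeks, do izključno katerega smo že obdelali vhodni niz
--     rezultat = ""
--     for idx, dolzina, zamenjava in zamenjave: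
--         if indeks < idx:
--             rezultat += niz[indeks:idx]
--             indeks = idx
--
--         rezultat += zamenjava
--         indeks += dolzina
--
--     if indeks != len(niz):
--         rezultat += niz[indeks:len(niz)]
--
--     return rezultat
-- ===== SOURCE B (Python) =====
-- import string
--
-- def predelaj_niz_za_latex(niz):
--     """Polepšaj niz, da bo bolje izgledal v latex-u"""
--
--     # Substitution rule, computed instead of tabulated: four special forms, an
--     # alias map (asin -> arcsin, ...) and the generic "{\NAME{(" ... ")}}" pattern.
--     def sub(name):
--         if name == "abs":
--             return ("{\\left|", "\\right|}")
--         if name == "sqrt":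
--             return ("{\\sqrt{", "}}")
--         if name == "log10":
--             return ("{\\log_{10}{(", ")}}")
--         if name == "log2":
--             return ("{\\log_2{(", ")}}")
--         if name == "":
--             return ("{(", ")}")
--         tex = {"acos": "arccos", "asin": "arcsin", "atan": "arctan"}.get(name, name)
--         if tex in ("arccos", "arcsin", "arctan", "cos", "cosh", "exp", "log",
--                    "ln", "sin", "sinh", "tan", "tanh"):
--             return ("{\\" + tex + "{(", ")}}")
--         return None
--
--     alnum = string.ascii_letters + string.digits
--     stack = []   # (parent_buffer, function_name) for every still-open "("
--     buf = ""     # output built so far on the current nesting level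
--     name = ""    # trailing letters/digits run not yet committed to buf
--     for ch in niz:
--         if ch in alnum:
--             name += ch
--         elif ch == "(":
--             stack.append((buf, name))
--             buf = ""
--             name = ""
--         elif ch == ")":
--             if not stack:
--                 raise ValueError("Malformed oklepaji v nizu")
--             parent, nm = stack.pop()
--             lr = sub(nm)
--             if lr is not None:
--                 buf = parent + lr[0] + buf + name + lr[1]
--             else:
--                 buf = parent + nm + "(" + buf + name + ")"
--             name = ""
--         else:
--             buf += name + ch
--             name = ""
--
--     # unclosed "(" stay literal: flatten the remaining stack back to text
--     res = buf + name
--     for parent, nm in reversed(stack):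
--         res = parent + nm + "(" + res
--     return res
-- ===== Notes on version B (the rewrite author's own statement) =====
-- stated objective: simpler
-- what changed: Replaces A's three-phase pipeline (scan for bracket pairs, build an absolute-index edit list, sort it and splice it into the string) with a single pass that builds the LaTeX output directly via a stack of (parent-buffer, function-name), and replaces the 20-entry substitution table by a computed rule (four special forms, an alias map and the generic '{\NAME{(' pattern).
import Mathlib
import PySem

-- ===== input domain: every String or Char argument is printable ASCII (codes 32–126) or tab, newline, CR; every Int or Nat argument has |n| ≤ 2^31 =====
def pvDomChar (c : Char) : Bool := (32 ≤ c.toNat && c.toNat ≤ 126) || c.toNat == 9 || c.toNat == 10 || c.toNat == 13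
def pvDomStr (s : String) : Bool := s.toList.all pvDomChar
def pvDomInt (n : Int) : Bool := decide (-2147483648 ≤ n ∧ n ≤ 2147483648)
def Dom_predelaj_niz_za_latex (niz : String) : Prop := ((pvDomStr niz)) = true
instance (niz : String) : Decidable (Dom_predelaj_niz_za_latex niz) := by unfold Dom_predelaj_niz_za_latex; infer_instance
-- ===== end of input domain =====

-- B rebuilds the string in ONE pass with a stack of (parent-buffer, name) and a computed
-- substitution rule, instead of A's collect-pairs / edit-list / sort / splice pipeline over a
-- 20-entry table (objective: simpler).  On a ')' with no matching '(' both Pythons raise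
-- ValueError; those inputs are excluded by Pre_.

-- ===== PORT A =====
-- the SUBSTITUCIJE table: (function name, left replacement, right replacement)
def pvSubsts : List (List Char × List Char × List Char) := [
  ("abs".toList, "{\\left|".toList, "\\right|}".toList),
  ("acos".toList, "{\\arccos{(".toList, ")}}".toList),
  ("arccos".toList, "{\\arccos{(".toList, ")}}".toList),
  ("asin".toList, "{\\arcsin{(".toList, ")}}".toList),
  ("arcsin".toList, "{\\arcsin{(".toList, ")}}".toList),
  ("atan".toList, "{\\arctan{(".toList, ")}}".toList),
  ("arctan".toList, "{\\arctan{(".toList, ")}}".toList),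
  ("cos".toList, "{\\cos{(".toList, ")}}".toList),
  ("cosh".toList, "{\\cosh{(".toList, ")}}".toList),
  ("exp".toList, "{\\exp{(".toList, ")}}".toList),
  ("log".toList, "{\\log{(".toList, ")}}".toList),
  ("ln".toList, "{\\ln{(".toList, ")}}".toList),
  ("sin".toList, "{\\sin{(".toList, ")}}".toList),
  ("sinh".toList, "{\\sinh{(".toList, ")}}".toList),
  ("sqrt".toList, "{\\sqrt{".toList, "}}".toList),
  ("tan".toList, "{\\tan{(".toList, ")}}".toList),
  ("tanh".toList, "{\\tanh{(".toList, ")}}".toList),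
  ("log10".toList, "{\\log_{10}{(".toList, ")}}".toList),
  ("log2".toList, "{\\log_2{(".toList, ")}}".toList),
  ([], "{(".toList, ")}".toList)]

-- one step of A's first loop ('for i, ch in enumerate(niz)'); state = (oklepaji, pari_oklepajev,
-- ime_funkcije), none = the ValueError was raised.  'ch in string.ascii_letters + string.digits'
-- is PySem.Chars.isalnum ch on the ASCII domain.
def pvScanStepA (st : Option (List (List Char × Int) × List (List Char × Int × Int) × List Char))
    (p : Int × Char) :
    Option (List (List Char × Int) × List (List Char × Int × Int) × List Char) :=
  match st with
  | none => none
  | some (okl, pari, ime) =>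
    if PySem.Chars.isalnum p.2 then some (okl, pari, ime ++ [p.2])
    else if p.2 = '(' then some (okl ++ [(ime, p.1)], pari, [])
    else if p.2 = ')' then
      match okl.getLast? with
      | none => none                                   -- raise ValueError
      | some iv => some (okl.dropLast, pari ++ [(iv.1, iv.2, p.1)], [])
    else some (okl, pari, [])

-- A's second loop: build the 'zamenjave' edit list from the collected pairs
def pvEditStep (z : List (Int × Int × List Char)) (t : List Char × Int × Int) :
    List (Int × Int × List Char) :=
  match pvSubsts.find? (fun s => s.1 == t.1) with
  | none => z                                          -- 'continue'
  | some s => z ++ [(t.2.1 - PySem.List.len t.1, PySem.List.len t.1 + 1, s.2.1),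
                    (t.2.2, (1 : Int), s.2.2)]

def pvEditsOf (pari : List (List Char × Int × Int)) : List (Int × Int × List Char) :=
  pari.foldl pvEditStep []

-- A's final loop: splice the sorted edits into the string; state = (indeks, rezultat)
def pvSpliceStep (cs : List Char) (st : Int × List Char) (e : Int × Int × List Char) :
    Int × List Char :=
  let st' := if st.1 < e.1 then (e.1, st.2 ++ PySem.List.slice cs (some st.1) (some e.1)) else st
  (st'.1 + e.2.1, st'.2 ++ e.2.2)

def predelaj_niz_za_latex (niz : String) : String :=
  match (PySem.List.enumerate niz.toList).foldl pvScanStepA (some ([], [], [])) with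
  | none => ""                                         -- the Python raises ValueError here (outside Pre_)
  | some st =>
    let zam := pvEditsOf st.2.1
    let zs := PySem.List.sorted zam (fun e => toLex (e.1, toLex (e.2.1, e.2.2)))   -- zamenjave.sort()
    let fin := zs.foldl (pvSpliceStep niz.toList) ((0 : Int), ([] : List Char))
    let rez := if fin.1 ≠ PySem.List.len niz.toList then
        fin.2 ++ PySem.List.slice niz.toList (some fin.1) (some (PySem.List.len niz.toList))
      else fin.2
    String.ofList rez

-- ===== PORT B =====
-- Source B's alias map: {"acos": "arccos", "asin": "arcsin", "atan": "arctan"}.get(name, name)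
def pvTexName (nm : List Char) : List Char :=
  if nm = "acos".toList then "arccos".toList
  else if nm = "asin".toList then "arcsin".toList
  else if nm = "atan".toList then "arctan".toList
  else nm

-- Source B's 'sub(name)': four special forms, then the generic "{\NAME{(" ... ")}}" pattern
def pvSubFn (nm : List Char) : Option (List Char × List Char) :=
  if nm = "abs".toList then some ("{\\left|".toList, "\\right|}".toList)
  else if nm = "sqrt".toList then some ("{\\sqrt{".toList, "}}".toList)
  else if nm = "log10".toList then some ("{\\log_{10}{(".toList, ")}}".toList)
  else if nm = "log2".toList then some ("{\\log_2{(".toList, ")}}".toList)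
  else if nm = ([] : List Char) then some ("{(".toList, ")}".toList)
  else
    let tex := pvTexName nm
    if tex ∈ ["arccos".toList, "arcsin".toList, "arctan".toList, "cos".toList,
              "cosh".toList, "exp".toList, "log".toList, "ln".toList,
              "sin".toList, "sinh".toList, "tan".toList, "tanh".toList] then
      some ("{\\".toList ++ tex ++ "{(".toList, ")}}".toList)
    else none

-- one step of Source B's single loop; state = (stack, buf, name), none = the ValueError was raised
def pvStepB (st : Option (List (List Char × List Char) × List Char × List Char)) (ch : Char) :
    Option (List (List Char × List Char) × List Char × List Char) :=
  match st with
  | none => none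
  | some (stk, buf, name) =>
    if PySem.Chars.isalnum ch then some (stk, buf, name ++ [ch])
    else if ch = '(' then some (stk ++ [(buf, name)], [], [])
    else if ch = ')' then
      match stk.getLast? with
      | none => none                                   -- raise ValueError
      | some pe =>
        match pvSubFn pe.2 with
        | some lr => some (stk.dropLast, pe.1 ++ lr.1 ++ (buf ++ name) ++ lr.2, [])
        | none => some (stk.dropLast, pe.1 ++ pe.2 ++ '(' :: (buf ++ name) ++ [')'], [])
    else some (stk, buf ++ name ++ [ch], [])

def predelaj_niz_za_latex_alt (niz : String) : String :=
  match niz.toList.foldl pvStepB (some ([], [], [])) with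
  | none => ""                                         -- Source B raises ValueError here (outside Pre_)
  | some st =>      -- res = buf + name;  for parent, nm in reversed(stack): res = parent + nm + "(" + res
    String.ofList (st.1.reverse.foldl (fun res pe => pe.1 ++ pe.2 ++ '(' :: res) (st.2.1 ++ st.2.2))

-- ===== PRECONDITION & SPEC =====
-- Pre_ excludes exactly the inputs with a ')' not matched by an earlier '(' — there the Python A
-- (and Source B alike) raises ValueError("Malformed oklepaji v nizu").
def Pre_predelaj_niz_za_latex (niz : String) : Prop :=
  ∀ k ∈ List.range (niz.toList.length + 1),
    (niz.toList.take k).count ')' ≤ (niz.toList.take k).count '('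
instance (niz : String) : Decidable (Pre_predelaj_niz_za_latex niz) := by
  unfold Pre_predelaj_niz_za_latex; infer_instance

def pvWitness_predelaj_niz_za_latex : String := "a+sin(cos(x))*2"

def Spec_predelaj_niz_za_latex (niz : String) (out : String) : Prop :=
  out = predelaj_niz_za_latex_alt niz
instance (niz : String) (out : String) : Decidable (Spec_predelaj_niz_za_latex niz out) := by
  unfold Spec_predelaj_niz_za_latex; infer_instance

-- ===== CLAIM (what is proved, stated in full; the proofs are below) =====
def Claim_equal_predelaj_niz_za_latex : Prop :=
  ∀ (niz : String), Dom_predelaj_niz_za_latex niz → Pre_predelaj_niz_za_latex niz →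
    Spec_predelaj_niz_za_latex niz (predelaj_niz_za_latex niz)


-- ---- proof helpers ----

-- the trailing letters/digits run of the first i characters
def pvRun (cs : List Char) : Nat → List Char
  | 0 => []
  | (i+1) => if PySem.Chars.isalnum (cs.getD i ' ') then pvRun cs i ++ [cs.getD i ' '] else []

lemma pvRun_succ (cs : List Char) (i : Nat) :
    pvRun cs (i+1) = if PySem.Chars.isalnum (cs.getD i ' ') then pvRun cs i ++ [cs.getD i ' '] else [] := rfl

lemma pvRun_len_le (cs : List Char) : ∀ i, (pvRun cs i).length ≤ i := by
  intro i; induction i with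
  | zero => simp [pvRun]
  | succ i ih =>
    rw [pvRun_succ]
    by_cases h : PySem.Chars.isalnum (cs.getD i ' ')
    · rw [if_pos h, List.length_append, List.length_singleton]; omega
    · rw [if_neg h]; simp

lemma pvRun_slice (cs : List Char) : ∀ i,
    (cs.drop (i - (pvRun cs i).length)).take (pvRun cs i).length = pvRun cs i := by
  intro i; induction i with
  | zero => simp [pvRun]
  | succ i ih =>
    by_cases h : PySem.Chars.isalnum (cs.getD i ' ')
    · have hle := pvRun_len_le cs i
      by_cases hi : i < cs.length
      · have hgd : cs.getD i ' ' = cs[i]'hi := by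
          simp [List.getD, List.getElem?_eq_getElem hi]
        have hval : pvRun cs (i+1) = pvRun cs i ++ [cs.getD i ' '] := by
          rw [pvRun_succ, if_pos h]
        have hlen : (pvRun cs (i+1)).length = (pvRun cs i).length + 1 := by
          rw [hval, List.length_append, List.length_singleton]
        rw [hlen, hval]
        have h1 : i + 1 - ((pvRun cs i).length + 1) = i - (pvRun cs i).length := by omega
        rw [h1, List.take_succ, ih]
        have h2 : (cs.drop (i - (pvRun cs i).length))[(pvRun cs i).length]? = some (cs[i]'hi) := by
          rw [List.getElem?_drop]
          have h3 : i - (pvRun cs i).length + (pvRun cs i).length = i := Nat.sub_add_cancel hle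
          rw [h3, List.getElem?_eq_getElem hi]
        rw [h2, hgd]
        simp
      · exfalso
        have hnone : cs.getD i ' ' = ' ' := by
          have h4 : cs[i]? = none := by rw [List.getElem?_eq_none_iff]; omega
          rw [List.getD, h4]; rfl
        rw [hnone] at h
        exact absurd h (by decide)
    · rw [pvRun_succ, if_neg h]; simp

abbrev PvEdit := Int × Int × List Char

def pvFindE (E : List PvEdit) (p : Int) : Option PvEdit := E.find? (fun e => e.1 == p)

lemma pvFindE_mem {E : List PvEdit} {p : Int} {e : PvEdit} (h : pvFindE E p = some e) :
    e ∈ E ∧ e.1 = p := by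
  unfold pvFindE at h
  refine ⟨List.mem_of_find?_eq_some h, ?_⟩
  have := List.find?_some h
  simpa using this

lemma pvFindE_eq_none {E : List PvEdit} {p : Int} (h : ∀ e ∈ E, e.1 ≠ p) :
    pvFindE E p = none := by
  unfold pvFindE
  rw [List.find?_eq_none]
  intro e he; simpa using h e he

def pvOut (cs : List Char) (E : List PvEdit) (i : Nat) (k : Nat) : List Char :=
  if k = 0 then [] else
    match pvFindE E (i : Int) with
    | some e => e.2.2 ++ pvOut cs E (i + max 1 e.2.1.toNat) (k - max 1 e.2.1.toNat)
    | none => cs.getD i ' ' :: pvOut cs E (i+1) (k-1)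
termination_by k
decreasing_by all_goals omega

lemma pvOut_zero (cs : List Char) (E : List PvEdit) (i : Nat) : pvOut cs E i 0 = [] := by
  simp [pvOut]

lemma pvOut_eq (cs : List Char) (E : List PvEdit) (i k : Nat) (hk : k ≠ 0) :
    pvOut cs E i k = match pvFindE E (i : Int) with
      | some e => e.2.2 ++ pvOut cs E (i + max 1 e.2.1.toNat) (k - max 1 e.2.1.toNat)
      | none => cs.getD i ' ' :: pvOut cs E (i+1) (k-1) := by
  conv_lhs => rw [pvOut]
  rw [if_neg hk]

lemma pvOut_congr (cs : List Char) (E E' : List PvEdit) : ∀ (k i : Nat),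
    (∀ p : Nat, i ≤ p → p < i + k → pvFindE E (p : Int) = pvFindE E' (p : Int)) →
    pvOut cs E i k = pvOut cs E' i k := by
  intro k
  induction k using Nat.strong_induction_on with
  | _ k ih =>
    intro i h
    by_cases hk : k = 0
    · simp [hk, pvOut_zero]
    rw [pvOut_eq cs E i k hk, pvOut_eq cs E' i k hk, h i (le_refl i) (by omega)]
    cases hf : pvFindE E' (i : Int) with
    | none =>
      simp only
      rw [ih (k-1) (by omega) (i+1) (fun p h1 h2 => h p (by omega) (by omega))]
    | some e =>
      simp only
      rw [ih (k - max 1 e.2.1.toNat) (by omega) (i + max 1 e.2.1.toNat)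
        (fun p h1 h2 => h p (by omega) (by omega))]

lemma pvOut_none (cs : List Char) (E : List PvEdit) : ∀ (k i : Nat),
    (∀ p : Nat, i ≤ p → p < i + k → pvFindE E (p : Int) = none) →
    i + k ≤ cs.length →
    pvOut cs E i k = (cs.drop i).take k := by
  intro k
  induction k with
  | zero => intro i _ _; simp [pvOut_zero]
  | succ k ih =>
    intro i h hlen
    rw [pvOut_eq cs E i (k+1) (by omega), h i (le_refl i) (by omega)]
    simp only
    have hi : i < cs.length := by omega
    have hgd : cs.getD i ' ' = cs[i]'hi := by simp [List.getD, List.getElem?_eq_getElem hi]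
    have hdrop : cs.drop i = cs[i]'hi :: cs.drop (i+1) := List.drop_eq_getElem_cons hi
    rw [hdrop, List.take_succ_cons, hgd]
    congr 1
    exact ih (i+1) (fun p h1 h2 => h p (by omega) (by omega)) (by omega)

lemma pvOut_split (cs : List Char) (E : List PvEdit)
    (hd : ∀ e ∈ E, 1 ≤ e.2.1) : ∀ (k1 k2 i : Nat),
    (∀ e ∈ E, (i : Int) ≤ e.1 → e.1 < ((i + k1 : Nat) : Int) → e.1 + e.2.1 ≤ ((i + k1 : Nat) : Int)) →
    pvOut cs E i (k1 + k2) = pvOut cs E i k1 ++ pvOut cs E (i + k1) k2 := by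
  intro k1
  induction k1 using Nat.strong_induction_on with
  | _ k1 ih =>
    intro k2 i h
    by_cases hk : k1 = 0
    · simp [hk, pvOut_zero]
    rw [pvOut_eq cs E i (k1+k2) (by omega), pvOut_eq cs E i k1 hk]
    cases hf : pvFindE E (i : Int) with
    | none =>
      simp only
      have harg : ∀ e ∈ E, ((i+1 : Nat) : Int) ≤ e.1 → e.1 < ((i + 1 + (k1 - 1) : Nat) : Int) →
          e.1 + e.2.1 ≤ ((i + 1 + (k1 - 1) : Nat) : Int) := by
        intro e he h1 h2
        have h4 : ((i + 1 + (k1 - 1) : Nat) : Int) = ((i + k1 : Nat) : Int) := by push_cast; omega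
        rw [h4] at h2 ⊢
        exact h e he (by push_cast at h1 ⊢; omega) h2
      have hrec := ih (k1-1) (by omega) k2 (i+1) harg
      have h3 : k1 + k2 - 1 = (k1 - 1) + k2 := by omega
      have h4 : i + 1 + (k1 - 1) = i + k1 := by omega
      rw [h3, hrec, h4, List.cons_append]
    | some e =>
      simp only
      obtain ⟨he, hestart⟩ := pvFindE_mem hf
      have hd1 : 1 ≤ e.2.1 := hd e he
      have hfit : e.1 + e.2.1 ≤ ((i + k1 : Nat) : Int) :=
        h e he (by omega) (by rw [hestart]; push_cast; omega)
      have hdk : e.2.1.toNat ≤ k1 := by rw [hestart] at hfit; push_cast at hfit; omega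
      have hdn : max 1 e.2.1.toNat = e.2.1.toNat := by omega
      set d := e.2.1.toNat with hdd
      have h5 : k1 + k2 - d = (k1 - d) + k2 := by omega
      have harg : ∀ f ∈ E, ((i + d : Nat) : Int) ≤ f.1 → f.1 < ((i + d + (k1 - d) : Nat) : Int) →
          f.1 + f.2.1 ≤ ((i + d + (k1 - d) : Nat) : Int) := by
        intro f hfe h1 h2
        have h6 : ((i + d + (k1 - d) : Nat) : Int) = ((i + k1 : Nat) : Int) := by push_cast; omega
        rw [h6] at h2 ⊢
        exact h f hfe (by push_cast at h1 ⊢; omega) h2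
      rw [hdn, h5, ih (k1 - d) (by omega) k2 (i + d) harg, ← List.append_assoc]
      congr 2
      omega

-- 'zs is a sorted, disjoint, in-bounds edit list starting at or after i'
def pvChain (n : Nat) : Int → List PvEdit → Prop
  | _, [] => True
  | i, e :: t => i ≤ e.1 ∧ 1 ≤ e.2.1 ∧ e.1 + e.2.1 ≤ (n : Int) ∧ pvChain n (e.1 + e.2.1) t

-- reference splice: copy up to the edit, emit the replacement, continue after it
def pvSplice (cs : List Char) : List PvEdit → Nat → List Char
  | [], i => cs.drop i
  | e :: t, i => (cs.drop i).take (e.1.toNat - i) ++ e.2.2 ++ pvSplice cs t (e.1 + e.2.1).toNat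

lemma pvChain_starts (n : Nat) : ∀ (t : List PvEdit) (i : Int), pvChain n i t →
    ∀ f ∈ t, i ≤ f.1 ∧ 1 ≤ f.2.1 := by
  intro t
  induction t with
  | nil => intro i _ f hf; cases hf
  | cons e t ih =>
    intro i hc f hf
    obtain ⟨h1, h2, h3, h4⟩ := hc
    rcases List.mem_cons.mp hf with rfl | hf
    · exact ⟨h1, h2⟩
    · have := ih (e.1 + e.2.1) h4 f hf
      exact ⟨by omega, this.2⟩

lemma pvChain_out (cs : List Char) : ∀ (zs : List PvEdit) (i : Nat),
    pvChain cs.length (i : Int) zs → i ≤ cs.length →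
    pvOut cs zs i (cs.length - i) = pvSplice cs zs i := by
  intro zs
  induction zs with
  | nil =>
    intro i _ hle
    rw [pvOut_none cs [] (cs.length - i) i (fun p _ _ => by simp [pvFindE]) (by omega)]
    rw [List.take_of_length_le (by rw [List.length_drop])]
    rfl
  | cons e t ih =>
    intro i hc hle
    obtain ⟨h1, h2, h3, h4⟩ := hc
    have hb0 : 0 ≤ e.1 := by omega
    set b := e.1.toNat with hbdef
    have hbe : e.1 = (b : Int) := by omega
    have hib : i ≤ b := by omega
    have hbn : b < cs.length := by omega
    have hstarts := pvChain_starts cs.length t (e.1 + e.2.1) h4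
    have hd : ∀ f ∈ e :: t, 1 ≤ f.2.1 := by
      intro f hf; rcases List.mem_cons.mp hf with rfl | hf
      · exact h2
      · exact (hstarts f hf).2
    have hnone : ∀ p : Nat, i ≤ p → p < i + (b - i) → pvFindE (e :: t) (p : Int) = none := by
      intro p hp1 hp2
      apply pvFindE_eq_none
      intro f hf
      rcases List.mem_cons.mp hf with rfl | hf
      · intro hcon; rw [hcon] at hbe; omega
      · intro hcon
        have := (hstarts f hf).1
        rw [hcon] at this; push_cast at this; omega
    have hnostart : ∀ f ∈ e :: t, ¬((i : Int) ≤ f.1 ∧ f.1 < (b : Int)) := by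
      intro f hf ⟨hf1, hf2⟩
      rcases List.mem_cons.mp hf with rfl | hf
      · omega
      · have := (hstarts f hf).1; omega
    have hsplit := pvOut_split cs (e :: t) hd (b - i) (cs.length - b) i (by
      intro f hf hf1 hf2
      exfalso
      exact hnostart f hf ⟨hf1, by push_cast at hf2 ⊢; omega⟩)
    have hk : cs.length - i = (b - i) + (cs.length - b) := by omega
    rw [hk, hsplit]
    have hfirst : pvOut cs (e :: t) i (b - i) = (cs.drop i).take (b - i) := by
      apply pvOut_none
      · exact hnone
      · omega
    have hib2 : i + (b - i) = b := by omega
    rw [hfirst, hib2]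
    -- at b the head edit fires
    have hfb : pvFindE (e :: t) (b : Int) = some e := by
      unfold pvFindE
      rw [List.find?_cons_of_pos]
      simp [hbe]
    set dn := e.2.1.toNat with hdndef
    have hdn1 : 1 ≤ dn := by omega
    have hdnmax : max 1 dn = dn := by omega
    have hbdn : b + dn ≤ cs.length := by omega
    rw [pvOut_eq cs (e :: t) b (cs.length - b) (by omega), hfb]
    simp only
    rw [hdnmax]
    have hcong : pvOut cs (e :: t) (b + dn) (cs.length - b - dn) =
        pvOut cs t (b + dn) (cs.length - b - dn) := by
      apply pvOut_congr
      intro p hp1 hp2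
      unfold pvFindE
      rw [List.find?_cons_of_neg]
      simp only [beq_iff_eq]
      omega
    have htail : ((e.1 + e.2.1).toNat : Int) = e.1 + e.2.1 := by omega
    have hrec := ih (e.1 + e.2.1).toNat (by rw [htail]; exact h4) (by omega)
    have hidx : (e.1 + e.2.1).toNat = b + dn := by omega
    rw [hidx] at hrec
    rw [hcong]
    have hk2 : cs.length - b - dn = cs.length - (b + dn) := by omega
    rw [hk2, hrec]
    simp only [pvSplice]
    rw [hidx, List.append_assoc]

-- A's final loop (with the trailing 'if indeks != len' append) computes pvSplice
lemma pvFold_splice (cs : List Char) : ∀ (zs : List PvEdit) (i : Nat) (acc : List Char),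
    pvChain cs.length (i : Int) zs → i ≤ cs.length →
    (if (zs.foldl (pvSpliceStep cs) ((i : Int), acc)).1 ≠ PySem.List.len cs then
        (zs.foldl (pvSpliceStep cs) ((i : Int), acc)).2 ++
          PySem.List.slice cs (some (zs.foldl (pvSpliceStep cs) ((i : Int), acc)).1)
            (some (PySem.List.len cs))
      else (zs.foldl (pvSpliceStep cs) ((i : Int), acc)).2)
    = acc ++ pvSplice cs zs i := by
  intro zs
  induction zs with
  | nil =>
    intro i acc _ hle
    simp only [List.foldl_nil, pvSplice]
    have hlen : PySem.List.len cs = ((cs.length : Nat) : Int) := by simp [PySem.List.len_eq]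
    by_cases h : (i : Int) ≠ PySem.List.len cs
    · rw [if_pos h, hlen, PySem.List.slice_natCast]
      rw [List.take_of_length_le (by rw [List.length_drop])]
    · rw [if_neg h]
      push_neg at h
      rw [hlen] at h
      have hi : i = cs.length := by omega
      rw [hi, List.drop_length, List.append_nil]
  | cons e t ih =>
    intro i acc hc hle
    obtain ⟨h1, h2, h3, h4⟩ := hc
    set b := e.1.toNat with hbdef
    have hbe : e.1 = (b : Int) := by omega
    set dn := e.2.1.toNat with hdndef
    have hde : e.2.1 = (dn : Int) := by omega
    have hnext : e.1 + e.2.1 = ((b + dn : Nat) : Int) := by push_cast; omega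
    have hbdnle : b + dn ≤ cs.length := by omega
    have hchain' : pvChain cs.length ((b + dn : Nat) : Int) t := by rw [← hnext]; exact h4
    rcases eq_or_lt_of_le h1 with heq | hlt
    · -- indeks = idx: no copy
      have hstep : pvSpliceStep cs ((i : Int), acc) e = (((b + dn : Nat) : Int), acc ++ e.2.2) := by
        unfold pvSpliceStep
        rw [if_neg (by omega)]
        simp only
        rw [heq, hnext]
      rw [List.foldl_cons, hstep, ih (b + dn) (acc ++ e.2.2) hchain' hbdnle]
      simp only [pvSplice]
      have hib : i = b := by omega
      rw [hib, Nat.sub_self, List.take_zero, List.nil_append, List.append_assoc, hnext, Int.toNat_natCast]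
    · -- indeks < idx: copy niz[indeks:idx] first
      have hstep : pvSpliceStep cs ((i : Int), acc) e =
          (((b + dn : Nat) : Int), (acc ++ (cs.drop i).take (b - i)) ++ e.2.2) := by
        unfold pvSpliceStep
        rw [if_pos (by omega)]
        simp only
        rw [hbe, PySem.List.slice_natCast]
        rw [show (b : Int) + e.2.1 = ((b + dn : Nat) : Int) by push_cast; omega]
      rw [List.foldl_cons, hstep, ih (b + dn) _ hchain' hbdnle]
      simp only [pvSplice]
      rw [hnext]
      rw [Int.toNat_natCast, hbe, Int.toNat_natCast]
      simp [List.append_assoc]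

-- with pairwise-distinct start positions, first-match lookup is permutation-invariant
lemma pvFindE_perm {zs zs' : List PvEdit} (hperm : zs.Perm zs')
    (hnd : (zs.map (·.1)).Nodup) (p : Int) : pvFindE zs p = pvFindE zs' p := by
  cases h : pvFindE zs p with
  | none =>
    cases h' : pvFindE zs' p with
    | none => rfl
    | some f =>
      obtain ⟨hf, hpf⟩ := pvFindE_mem h'
      unfold pvFindE at h
      rw [List.find?_eq_none] at h
      exact absurd (by simp [hpf]) (h f (hperm.symm.subset hf))
  | some e =>
    obtain ⟨he, hp⟩ := pvFindE_mem h
    cases h' : pvFindE zs' p with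
    | none =>
      unfold pvFindE at h'
      rw [List.find?_eq_none] at h'
      exact absurd (by simp [hp]) (h' e (hperm.subset he))
    | some f =>
      obtain ⟨hf, hpf⟩ := pvFindE_mem h'
      have hf2 : f ∈ zs := hperm.symm.subset hf
      have : e = f := List.inj_on_of_nodup_map hnd he hf2 (by rw [hp, hpf])
      rw [this]

lemma pvChain_of_sorted (n : Nat) : ∀ (ys : List PvEdit) (i : Int),
    ys.Pairwise (fun e f => e.1 ≤ f.1) →
    ys.Pairwise (fun e f => e.1 + e.2.1 ≤ f.1 ∨ f.1 + f.2.1 ≤ e.1) →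
    (∀ e ∈ ys, 1 ≤ e.2.1 ∧ e.1 + e.2.1 ≤ (n : Int)) →
    (∀ e ∈ ys, i ≤ e.1) → pvChain n i ys := by
  intro ys
  induction ys with
  | nil => intro i _ _ _ _; trivial
  | cons e t ih =>
    intro i hle hdisj hb hge
    refine ⟨hge e (by simp), (hb e (by simp)).1, (hb e (by simp)).2, ?_⟩
    apply ih
    · exact hle.of_cons
    · exact hdisj.of_cons
    · intro f hf; exact hb f (by simp [hf])
    · intro f hf
      rcases (List.pairwise_cons.mp hdisj).1 f hf with h | h
      · exact h
      · exfalso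
        have h1 := (List.pairwise_cons.mp hle).1 f hf
        have h2 := (hb f (by simp [hf])).1
        omega

-- correspondence between A's oklepaji stack and B's buffer stack (both top-first here);
-- the Nat parameter is the position right after the innermost open '(' (0 for an empty stack)
inductive PvRel (cs : List Char) (E : List PvEdit) :
    List (List Char × Int) → List (List Char × List Char) → Nat → Prop
  | nil : PvRel cs E [] [] 0
  | cons (tA : List (List Char × Int)) (tB : List (List Char × List Char)) (a : Nat)
      (nm text : List Char) (l : Nat) :
      PvRel cs E tA tB a →
      a + nm.length ≤ l → l < cs.length →
      text = pvOut cs E a (l - nm.length - a) →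
      (cs.drop (l - nm.length)).take nm.length = nm →
      cs.getD l ' ' = '(' →
      PvRel cs E ((nm, (l : Int)) :: tA) ((text, nm) :: tB) (l + 1)

lemma pvRel_bound {cs : List Char} {E : List PvEdit} :
    ∀ {rA rB a}, PvRel cs E rA rB a → ∀ z ∈ rA, 0 ≤ z.2 ∧ z.2 < (a : Int) := by
  intro rA rB a h
  induction h with
  | nil => intro z hz; cases hz
  | cons tA tB a nm text l hrel h1 h2 h3 h4 h5 ih =>
    intro z hz
    rcases List.mem_cons.mp hz with rfl | hz
    · constructor <;> [positivity; push_cast] <;> omega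
    · have := ih z hz
      constructor
      · exact this.1
      · push_cast at this ⊢; omega

lemma pvRel_mono {cs : List Char} {E E' : List PvEdit} :
    ∀ {rA rB a}, PvRel cs E rA rB a →
    (∀ p : Nat, p < a → pvFindE E (p : Int) = pvFindE E' (p : Int)) →
    PvRel cs E' rA rB a := by
  intro rA rB a h
  induction h with
  | nil => intro _; exact PvRel.nil
  | cons tA tB a nm text l hrel h1 h2 h3 h4 h5 ih =>
    intro hagree
    refine PvRel.cons tA tB a nm text l (ih (fun p hp => hagree p (by omega))) h1 h2 ?_ h4 h5
    rw [h3]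
    apply pvOut_congr
    intro p hp1 hp2
    exact hagree p (by omega)

-- flattening B's remaining stack over the tail output reproduces the whole spliced string
lemma pvRel_flatten (cs : List Char) (E : List PvEdit)
    (hd : ∀ e ∈ E, 1 ≤ e.2.1) :
    ∀ {rA rB a}, PvRel cs E rA rB a →
    (∀ e ∈ E, ∀ z ∈ rA, e.1 + e.2.1 ≤ z.2 - (z.1.length : Int) ∨ z.2 + 1 ≤ e.1) →
    ∀ inner, inner = pvOut cs E a (cs.length - a) → a ≤ cs.length →
    rB.foldl (fun res pe => pe.1 ++ pe.2 ++ '(' :: res) inner = pvOut cs E 0 cs.length := by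
  intro rA rB a h
  induction h with
  | nil =>
    intro _ inner hin _
    simpa using hin
  | cons tA tB a nm text l hrel h1 h2 h3 h4 h5 ih =>
    intro hzone inner hin hle
    rw [List.foldl_cons]
    apply ih (fun e he z hz => hzone e he z (by simp [hz]))
    · change (text ++ nm) ++ ('(' :: inner) = pvOut cs E a (cs.length - a)
      rw [List.append_assoc]
      have hz : ∀ e ∈ E, e.1 + e.2.1 ≤ ((l - nm.length : Nat) : Int) ∨ ((l + 1 : Nat) : Int) ≤ e.1 := by
        intro e he
        have := hzone e he (nm, (l : Int)) (by simp)
        push_cast at this ⊢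
        omega
      have hsplit1 := pvOut_split cs E hd (l - nm.length - a) (cs.length - (l - nm.length)) a (by
        intro e he he1 he2
        rcases hz e he with h | h
        · push_cast at he2 h ⊢; omega
        · exfalso; push_cast at he2 h; omega)
      have hk1 : cs.length - a = (l - nm.length - a) + (cs.length - (l - nm.length)) := by omega
      have ha1 : a + (l - nm.length - a) = l - nm.length := by omega
      rw [hk1, hsplit1, ha1, ← h3]
      congr 1
      -- nm ++ '(' :: inner = pvOut cs E (l - nm.length) (cs.length - (l - nm.length))
      have hns : ∀ e ∈ E, ¬(((l - nm.length : Nat) : Int) ≤ e.1 ∧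
          e.1 < ((l - nm.length : Nat) : Int) + (nm.length + 1)) := by
        intro e he hc
        obtain ⟨hc1, hc2⟩ := hc
        rcases hz e he with h | h
        · have := hd e he; push_cast at h hc1; omega
        · push_cast at h hc2; omega
      have hsplit2 := pvOut_split cs E hd (nm.length + 1) (cs.length - (l + 1)) (l - nm.length) (by
        intro e he he1 he2
        exact absurd ⟨he1, by push_cast at he2 ⊢; omega⟩ (hns e he))
      have hmid : pvOut cs E (l - nm.length) (nm.length + 1) =
          (cs.drop (l - nm.length)).take (nm.length + 1) := by
        apply pvOut_none
        · intro p hp1 hp2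
          apply pvFindE_eq_none
          intro e he hcon
          exact hns e he ⟨by rw [hcon]; push_cast; omega, by rw [hcon]; push_cast; omega⟩
        · omega
      have hl : l - nm.length + nm.length = l := by omega
      have htake : (cs.drop (l - nm.length)).take (nm.length + 1) = nm ++ [cs.getD l ' '] := by
        rw [List.take_succ, h4]
        congr 1
        rw [List.getElem?_drop, hl, List.getElem?_eq_getElem h2]
        simp [List.getD, List.getElem?_eq_getElem h2]
      have hk2 : cs.length - (l - nm.length) = (nm.length + 1) + (cs.length - (l + 1)) := by omega
      have ha2 : l - nm.length + (nm.length + 1) = l + 1 := by omega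
      rw [hk2, hsplit2, ha2, hmid, htake, hin, h5]
      simp
    · omega

def pvScanA (cs : List Char) (i : Nat) :
    Option (List (List Char × Int) × List (List Char × Int × Int) × List Char) :=
  ((PySem.List.enumerate cs).take i).foldl pvScanStepA (some ([], [], []))

def pvScanB (cs : List Char) (i : Nat) :
    Option (List (List Char × List Char) × List Char × List Char) :=
  (cs.take i).foldl pvStepB (some ([], [], []))

lemma pvScanA_succ (cs : List Char) (i : Nat) (hi : i < cs.length) :
    pvScanA cs (i+1) = pvScanStepA (pvScanA cs i) (((i : Nat) : Int), cs[i]) := by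
  unfold pvScanA
  rw [List.take_succ, List.getElem?_eq_getElem (by rw [PySem.List.length_enumerate]; exact hi)]
  rw [PySem.List.getElem_enumerate]
  simp [List.foldl_append]

lemma pvTake_succ (cs : List Char) (i : Nat) (hi : i < cs.length) :
    cs.take (i+1) = cs.take i ++ [cs[i]] := by
  rw [List.take_succ, List.getElem?_eq_getElem hi]
  rfl

lemma pvScanB_succ (cs : List Char) (i : Nat) (hi : i < cs.length) :
    pvScanB cs (i+1) = pvStepB (pvScanB cs i) cs[i] := by
  unfold pvScanB
  rw [pvTake_succ cs i hi, List.foldl_append]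
  rfl

lemma pvGetD (cs : List Char) (i : Nat) (hi : i < cs.length) :
    cs.getD i ' ' = cs[i] := by
  simp [List.getD, List.getElem?_eq_getElem hi]

lemma pvEditsOf_snoc (pari : List (List Char × Int × Int)) (t : List Char × Int × Int) :
    pvEditsOf (pari ++ [t]) = pvEditStep (pvEditsOf pari) t := by
  unfold pvEditsOf
  rw [List.foldl_append, List.foldl_cons, List.foldl_nil]

-- A's linear search through SUBSTITUCIJE agrees with Source B's computed substitution rule
lemma pvLookup_eq (nm : List Char) :
    (pvSubsts.find? (fun s => s.1 == nm)).map (fun s => (s.2.1, s.2.2)) = pvSubFn nm := by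
  by_cases h1 : nm = "abs".toList;    · subst h1; decide
  by_cases h2 : nm = "acos".toList;   · subst h2; decide
  by_cases h3 : nm = "arccos".toList; · subst h3; decide
  by_cases h4 : nm = "asin".toList;   · subst h4; decide
  by_cases h5 : nm = "arcsin".toList; · subst h5; decide
  by_cases h6 : nm = "atan".toList;   · subst h6; decide
  by_cases h7 : nm = "arctan".toList; · subst h7; decide
  by_cases h8 : nm = "cos".toList;    · subst h8; decide
  by_cases h9 : nm = "cosh".toList;   · subst h9; decide
  by_cases h10 : nm = "exp".toList;   · subst h10; decide
  by_cases h11 : nm = "log".toList;   · subst h11; decide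
  by_cases h12 : nm = "ln".toList;    · subst h12; decide
  by_cases h13 : nm = "sin".toList;   · subst h13; decide
  by_cases h14 : nm = "sinh".toList;  · subst h14; decide
  by_cases h15 : nm = "sqrt".toList;  · subst h15; decide
  by_cases h16 : nm = "tan".toList;   · subst h16; decide
  by_cases h17 : nm = "tanh".toList;  · subst h17; decide
  by_cases h18 : nm = "log10".toList; · subst h18; decide
  by_cases h19 : nm = "log2".toList;  · subst h19; decide
  by_cases h20 : nm = ([] : List Char); · subst h20; decide
  have hfind : pvSubsts.find? (fun s => s.1 == nm) = none := by
    rw [List.find?_eq_none]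
    intro x hx
    fin_cases hx <;> simp [beq_iff_eq] <;>
      first
        | exact Ne.symm h1 | exact Ne.symm h2 | exact Ne.symm h3 | exact Ne.symm h4
        | exact Ne.symm h5 | exact Ne.symm h6 | exact Ne.symm h7 | exact Ne.symm h8
        | exact Ne.symm h9 | exact Ne.symm h10 | exact Ne.symm h11 | exact Ne.symm h12
        | exact Ne.symm h13 | exact Ne.symm h14 | exact Ne.symm h15 | exact Ne.symm h16
        | exact Ne.symm h17 | exact Ne.symm h18 | exact Ne.symm h19 | exact Ne.symm h20
        | exact h1 | exact h2 | exact h3 | exact h4 | exact h5 | exact h6 | exact h7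
        | exact h8 | exact h9 | exact h10 | exact h11 | exact h12 | exact h13 | exact h14
        | exact h15 | exact h16 | exact h17 | exact h18 | exact h19 | exact h20
  have hsub : pvSubFn nm = none := by
    unfold pvSubFn pvTexName
    rw [if_neg h1, if_neg h15, if_neg h18, if_neg h19, if_neg h20,
      if_neg h2, if_neg h4, if_neg h6]
    rw [if_neg ?_]
    intro hmem
    simp only [List.mem_cons, List.not_mem_nil, or_false] at hmem
    rcases hmem with h|h|h|h|h|h|h|h|h|h|h|h
    exacts [h3 h, h5 h, h7 h, h8 h, h9 h, h10 h, h11 h, h12 h, h13 h, h14 h, h16 h, h17 h]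
  rw [hfind, hsub]
  rfl

lemma pvAlnum_ne (c : Char) (h : PySem.Chars.isalnum c = true) : c ≠ '(' ∧ c ≠ ')' := by
  constructor <;> rintro rfl <;> exact absurd h (by decide)

lemma pvCount_succ (cs : List Char) (i : Nat) (hi : i < cs.length) (x : Char) :
    (cs.take (i+1)).count x = (cs.take i).count x + (if cs[i] = x then 1 else 0) := by
  rw [pvTake_succ cs i hi, List.count_append]
  by_cases h : cs[i] = x <;> simp [h, List.count_singleton, beq_iff_eq]

-- everything the two scans keep in sync after i characters
structure PvInv (cs : List Char) (i : Nat)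
    (okl : List (List Char × Int)) (pari : List (List Char × Int × Int))
    (stk : List (List Char × List Char)) (buf : List Char) (a : Nat) : Prop where
  hrel : PvRel cs (pvEditsOf pari) okl.reverse stk.reverse a
  hbuf : buf = pvOut cs (pvEditsOf pari) a (i - (pvRun cs i).length - a)
  hai : a + (pvRun cs i).length ≤ i
  hgood : ∀ e ∈ pvEditsOf pari, 1 ≤ e.2.1 ∧ 0 ≤ e.1 ∧
    e.1 + e.2.1 ≤ ((i - (pvRun cs i).length : Nat) : Int)
  hzone : ∀ e ∈ pvEditsOf pari, ∀ z ∈ okl,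
    e.1 + e.2.1 ≤ z.2 - (z.1.length : Int) ∨ z.2 + 1 ≤ e.1
  hdisj : (pvEditsOf pari).Pairwise (fun e f => e.1 + e.2.1 ≤ f.1 ∨ f.1 + f.2.1 ≤ e.1)
  hnd : ((pvEditsOf pari).map (·.1)).Nodup
  hcount : okl.length + (cs.take i).count ')' = (cs.take i).count '('

theorem pvMain (cs : List Char)
    (hpre : ∀ k, k ≤ cs.length → (cs.take k).count ')' ≤ (cs.take k).count '(') :
    ∀ i, i ≤ cs.length → ∃ okl pari stk buf a,
      pvScanA cs i = some (okl, pari, pvRun cs i) ∧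
      pvScanB cs i = some (stk, buf, pvRun cs i) ∧
      PvInv cs i okl pari stk buf a := by
  intro i
  induction i with
  | zero =>
    intro _
    refine ⟨[], [], [], [], 0, rfl, rfl, ?_⟩
    constructor
    · exact PvRel.nil
    · simp [pvRun, pvOut_zero, pvEditsOf]
    · simp [pvRun]
    · intro e he; simp [pvEditsOf] at he
    · intro e he; simp [pvEditsOf] at he
    · simp [pvEditsOf]
    · simp [pvEditsOf]
    · simp
  | succ i ih =>
    intro hi1
    have hi : i < cs.length := by omega
    obtain ⟨okl, pari, stk, buf, a, hA, hB, inv⟩ := ih (by omega)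
    set c := cs[i] with hcdef
    have hgd : cs.getD i ' ' = c := pvGetD cs i hi
    have hrunlen := pvRun_len_le cs i
    rw [pvScanA_succ cs i hi, hA]
    rw [pvScanB_succ cs i hi, hB]
    rw [show (cs[i]'hi) = c from hcdef.symm]
    by_cases hal : PySem.Chars.isalnum c
    · -- alphanumeric: the name run grows
      have hrs : pvRun cs (i+1) = pvRun cs i ++ [c] := by
        rw [pvRun_succ, hgd, if_pos hal]
      have hlen : (pvRun cs (i+1)).length = (pvRun cs i).length + 1 := by
        rw [hrs, List.length_append, List.length_singleton]
      refine ⟨okl, pari, stk, buf, a, ?_, ?_, ?_⟩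
      · simp [pvScanStepA, hal, hrs]
      · simp [pvStepB, hal, hrs]
      · obtain ⟨hrel, hbuf, hai, hgood, hzone, hdisj, hnd, hcount⟩ := inv
        constructor
        · exact hrel
        · rw [hbuf]; congr 1; omega
        · omega
        · intro e he
          obtain ⟨g1, g2, g3⟩ := hgood e he
          refine ⟨g1, g2, ?_⟩
          have : ((i + 1 - (pvRun cs (i+1)).length : Nat) : Int)
              = ((i - (pvRun cs i).length : Nat) : Int) := by push_cast [hlen]; omega
          rw [this]; exact g3
        · exact hzone
        · exact hdisj
        · exact hnd
        · obtain ⟨hne1, hne2⟩ := pvAlnum_ne c hal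
          rw [pvCount_succ cs i hi, pvCount_succ cs i hi, ← hcdef, if_neg hne1, if_neg hne2]
          omega
    · by_cases hop : c = '('
      · -- push
        obtain ⟨hrel, hbuf, hai, hgood, hzone, hdisj, hnd, hcount⟩ := inv
        have hrs : pvRun cs (i+1) = [] := by rw [pvRun_succ, hgd, if_neg hal]
        set L := (pvRun cs i).length with hLdef
        refine ⟨okl ++ [(pvRun cs i, (i : Int))], pari, stk ++ [(buf, pvRun cs i)], [],
          i + 1, ?_, ?_, ?_⟩
        · simp [pvScanStepA, hal, hop, hrs]
          decide
        · simp [pvStepB, hal, hop, hrs]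
          decide
        · constructor
          · rw [List.reverse_append, List.reverse_append]
            simp only [List.reverse_singleton, List.singleton_append]
            exact PvRel.cons okl.reverse stk.reverse a (pvRun cs i) buf i hrel (by omega) hi
              hbuf (pvRun_slice cs i) (by rw [hgd, hop])
          · rw [hrs]
            simp [pvOut_zero]
          · rw [hrs]; simp
          · intro e he
            obtain ⟨g1, g2, g3⟩ := hgood e he
            refine ⟨g1, g2, ?_⟩
            rw [hrs]
            simp only [List.length_nil]
            omega
          · intro e he z hz
            rcases List.mem_append.mp hz with hz | hz
            · exact hzone e he z hz
            · have hzeq : z = (pvRun cs i, (i : Int)) := by simpa using hz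
              subst hzeq
              left
              have g3 := (hgood e he).2.2
              simp only
              omega
          · exact hdisj
          · exact hnd
          · rw [pvCount_succ cs i hi, pvCount_succ cs i hi, ← hcdef, if_pos hop,
              if_neg (by rw [hop]; decide)]
            simp only [List.length_append, List.length_singleton]
            omega
      · by_cases hcl : c = ')'
        · -- pop
          obtain ⟨hrel, hbuf, hai, hgood, hzone, hdisj, hnd, hcount⟩ := inv
          have hrs : pvRun cs (i+1) = [] := by rw [pvRun_succ, hgd, if_neg hal]
          set L := (pvRun cs i).length with hLdef
          have hLle : L ≤ i := hrunlen
          have hok : okl ≠ [] := by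
            intro h0
            have hc1 := hpre (i+1) hi1
            rw [pvCount_succ cs i hi, pvCount_succ cs i hi, ← hcdef, if_pos hcl,
              if_neg (by rw [hcl]; decide)] at hc1
            rw [h0] at hcount
            simp at hcount
            omega
          obtain ⟨z, tA, hrokl⟩ : ∃ z tA, okl.reverse = z :: tA := by
            cases hre : okl.reverse with
            | nil => exact absurd (by simpa using hre) hok
            | cons z t => exact ⟨z, t, rfl⟩
          rw [hrokl] at hrel
          obtain ⟨rstk, hrstk⟩ : ∃ r, stk.reverse = r := ⟨_, rfl⟩
          rw [hrstk] at hrel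
          cases hrel with
          | cons tA2 tB a2 nm text l hrel' hle1 hllen h3 h4 h5 =>
          -- reconstruct the two stacks
          have hoklv : okl = tA.reverse ++ [(nm, (l : Int))] := by
            rw [← List.reverse_reverse okl, hrokl]
            simp
          have hstkv : stk = tB.reverse ++ [(text, nm)] := by
            rw [← List.reverse_reverse stk, hrstk]
            simp
          have hoklast : okl.getLast? = some (nm, (l : Int)) := by
            rw [hoklv, List.getLast?_concat]
          have hstklast : stk.getLast? = some (text, nm) := by
            rw [hstkv, List.getLast?_concat]
          have hokdrop : okl.dropLast = tA.reverse := by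
            rw [hoklv, List.dropLast_concat]
          have hstkdrop : stk.dropLast = tB.reverse := by
            rw [hstkv, List.dropLast_concat]
          have hmemtop : (nm, (l : Int)) ∈ okl := by rw [hoklv]; simp
          set N := nm.length with hNdef
          set b := l - N with hbdef
          have hbN : ((b : Nat) : Int) = (l : Int) - (N : Int) := by push_cast; omega
          have hli : l + 1 + L ≤ i := hai
          have hz : ∀ e ∈ pvEditsOf pari,
              e.1 + e.2.1 ≤ (l : Int) - (N : Int) ∨ (l : Int) + 1 ≤ e.1 := by
            intro e he
            have := hzone e he (nm, (l : Int)) hmemtop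
            simpa using this
          have hEnotb : ∀ p : Nat, b ≤ p → pvFindE (pvEditsOf pari) (p : Int) = none ∨
              (∃ e ∈ pvEditsOf pari, e.1 = (p : Int)) := by
            intro p _
            cases hf : pvFindE (pvEditsOf pari) (p : Int) with
            | none => exact Or.inl rfl
            | some e => exact Or.inr ⟨e, (pvFindE_mem hf).1, (pvFindE_mem hf).2⟩
          have hEb : pvFindE (pvEditsOf pari) ((b : Nat) : Int) = none := by
            apply pvFindE_eq_none
            intro e he hcon
            rcases hz e he with h | h
            · have := (hgood e he).1; rw [hcon] at h; rw [hbN] at h; omega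
            · rw [hcon] at h; rw [hbN] at h; omega
          have hEi : pvFindE (pvEditsOf pari) ((i : Nat) : Int) = none := by
            apply pvFindE_eq_none
            intro e he hcon
            have h2 := (hgood e he).2.2
            have h1 := (hgood e he).1
            rw [hcon] at h2
            push_cast at h2
            omega
          have hErun : ∀ p : Nat, i - L ≤ p → p < i + 1 →
              pvFindE (pvEditsOf pari) (p : Int) = none := by
            intro p hp1 hp2
            apply pvFindE_eq_none
            intro e he hcon
            have h2 := (hgood e he).2.2
            have h1 := (hgood e he).1
            rw [hcon] at h2
            push_cast at h2
            omega
          -- the two lookups agree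
          have hlook := pvLookup_eq nm
          cases hfind : pvSubsts.find? (fun s => s.1 == nm) with
          | none =>
            -- unknown function name: the pair is skipped, parentheses stay literal
            have hget : pvSubFn nm = none := by rw [← hlook, hfind]; rfl
            have hE' : pvEditsOf (pari ++ [(nm, (l : Int), (i : Int))]) = pvEditsOf pari := by
              rw [pvEditsOf_snoc]
              unfold pvEditStep
              rw [hfind]
            refine ⟨tA.reverse, pari ++ [(nm, (l : Int), (i : Int))], tB.reverse,
              ((text ++ nm) ++ ('(' :: (buf ++ pvRun cs i))) ++ [')'], a2, ?_, ?_, ?_⟩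
            · have hfa : PySem.Chars.isalnum ')' = false := by decide
              simp [pvScanStepA, hcl, hfa, hoklast, hrs, hokdrop]
            · have hfa : PySem.Chars.isalnum ')' = false := by decide
              simp [pvStepB, hcl, hfa, hstklast, hget, hrs, hstkdrop]
            · constructor
              · rw [hE', List.reverse_reverse, List.reverse_reverse]
                exact hrel'
              · -- the buffer equation, unknown-name case
                rw [hE', hrs]
                have hd1 : ∀ e ∈ pvEditsOf pari, 1 ≤ e.2.1 := fun e he => (hgood e he).1
                have hsplit1 := pvOut_split cs (pvEditsOf pari) hd1 (b - a2) (i + 1 - b) a2 (by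
                  intro e he he1 he2
                  rcases hz e he with h | h
                  · push_cast at he2 ⊢; omega
                  · exfalso; push_cast at he2; omega)
                have hsplit2 := pvOut_split cs (pvEditsOf pari) hd1 (N + 1) (i - l) b (by
                  intro e he he1 he2
                  exfalso
                  rcases hz e he with h | h
                  · have := hd1 e he; push_cast at he1; omega
                  · push_cast at he2; omega)
                have hsplit3 := pvOut_split cs (pvEditsOf pari) hd1 (i - L - (l+1)) (L + 1)
                    (l+1) (by
                  intro e he he1 he2
                  have h2 := (hgood e he).2.2
                  push_cast at he2 ⊢
                  omega)
                have hsplit4 := pvOut_split cs (pvEditsOf pari) hd1 L 1 (i - L) (by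
                  intro e he he1 he2
                  exfalso
                  have h2 := (hgood e he).2.2
                  have h1 := (hgood e he).1
                  push_cast at he1
                  omega)
                have hmid1 : pvOut cs (pvEditsOf pari) b (N + 1)
                    = (cs.drop b).take (N + 1) := by
                  apply pvOut_none
                  · intro p hp1 hp2
                    apply pvFindE_eq_none
                    intro e he hcon
                    rcases hz e he with h | h
                    · have := hd1 e he; rw [hcon] at h; push_cast at h; omega
                    · rw [hcon] at h; push_cast at h; omega
                  · omega
                have htake1 : (cs.drop b).take (N + 1) = nm ++ ['('] := by
                  rw [List.take_succ, hbdef, h4]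
                  congr 1
                  rw [List.getElem?_drop, show l - N + N = l from by omega,
                    List.getElem?_eq_getElem hllen]
                  have hcl2 : cs[l]'hllen = '(' := by rw [← pvGetD cs l hllen]; exact h5
                  rw [hcl2]
                  rfl
                have hmid2 : pvOut cs (pvEditsOf pari) (i - L) L
                    = (cs.drop (i - L)).take L := by
                  apply pvOut_none
                  · intro p hp1 hp2
                    exact hErun p hp1 (by omega)
                  · omega
                have hmid3 : pvOut cs (pvEditsOf pari) i 1 = [')'] := by
                  rw [pvOut_eq cs _ i 1 (by omega), hEi]
                  simp only
                  rw [show cs.getD i ' ' = ')' from by rw [hgd, hcl], show 1 - 1 = 0 from rfl,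
                    pvOut_zero]
                have hk : i + 1 - ([] : List Char).length - a2 = (b - a2) + (i + 1 - b) := by
                  simp; omega
                rw [hk, hsplit1, show a2 + (b - a2) = b from by omega]
                have hk2 : i + 1 - b = (N + 1) + (i - l) := by omega
                rw [hk2, hsplit2, show b + (N + 1) = l + 1 from by omega]
                have hk3 : i - l = (i - L - (l+1)) + (L + 1) := by omega
                rw [hk3, hsplit3, show l + 1 + (i - L - (l + 1)) = i - L from by omega]
                rw [hsplit4, show i - L + L = i from by omega]
                rw [hmid1, htake1, hmid2, pvRun_slice cs i, hmid3]
                rw [← h3, ← hbuf]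
                simp [List.append_assoc]
              · simp [hrs]; omega
              · rw [hE', hrs]
                intro e he
                obtain ⟨g1, g2, g3⟩ := hgood e he
                refine ⟨g1, g2, ?_⟩
                simp only [List.length_nil]
                omega
              · rw [hE']
                intro e he zz hzz
                exact hzone e he zz (by rw [hoklv]; simp; left; simpa using hzz)
              · rw [hE']; exact hdisj
              · rw [hE']; exact hnd
              · rw [pvCount_succ cs i hi, pvCount_succ cs i hi, ← hcdef, if_pos hcl,
                  if_neg (by rw [hcl]; decide)]
                rw [hoklv] at hcount
                simp only [List.length_append, List.length_reverse,
                  List.length_singleton] at hcount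
                simp only [List.length_reverse]
                omega
          | some s =>
            -- known function name: two edits are appended
            have hget : pvSubFn nm = some (s.2.1, s.2.2) := by rw [← hlook, hfind]; rfl
            set eL : PvEdit := ((l : Int) - (N : Int), (N : Int) + 1, s.2.1) with heLdef
            set eR : PvEdit := ((i : Int), 1, s.2.2) with heRdef
            set E2 : List PvEdit := pvEditsOf pari ++ [eL, eR] with hE2def
            have hE' : pvEditsOf (pari ++ [(nm, (l : Int), (i : Int))]) = E2 := by
              rw [pvEditsOf_snoc]
              unfold pvEditStep
              rw [hfind]
              simp [PySem.List.len_eq, hE2def, heLdef, heRdef, hNdef]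
            have hfapp : ∀ p : Int, pvFindE E2 p =
                (pvFindE (pvEditsOf pari) p).or (pvFindE [eL, eR] p) := by
              intro p
              unfold pvFindE
              rw [List.find?_append]
            have hfE2b : pvFindE E2 ((b : Nat) : Int) = some eL := by
              rw [hfapp, hEb]
              unfold pvFindE
              simp [heLdef, hbN]
            have hfE2i : pvFindE E2 ((i : Nat) : Int) = some eR := by
              rw [hfapp, hEi]
              unfold pvFindE
              have : ¬((l : Int) - (N : Int) == (i : Int)) = true := by
                simp [beq_iff_eq]; omega
              simp [heLdef, heRdef, List.find?_cons, this]
            have hagree : ∀ p : Nat, p ≠ b → p ≠ i →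
                pvFindE E2 ((p : Nat) : Int) = pvFindE (pvEditsOf pari) ((p : Nat) : Int) := by
              intro p hpb hpi
              rw [hfapp]
              cases hf : pvFindE (pvEditsOf pari) ((p : Nat) : Int) with
              | some e => rfl
              | none =>
                simp only [Option.or]
                apply pvFindE_eq_none
                intro e he hcon
                rcases List.mem_cons.mp he with rfl | hee
                · simp only [heLdef] at hcon
                  rw [← hbN] at hcon
                  have hpb2 : b = p := by exact_mod_cast hcon
                  exact hpb hpb2.symm
                · rcases List.mem_singleton.mp hee with rfl
                  simp only [heRdef] at hcon
                  have hpi2 : i = p := by exact_mod_cast hcon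
                  exact hpi hpi2.symm
            have hd2 : ∀ e ∈ E2, 1 ≤ e.2.1 := by
              intro e he
              rcases List.mem_append.mp he with he | he
              · exact (hgood e he).1
              · rcases List.mem_cons.mp he with rfl | hee
                · simp [heLdef]
                · rcases List.mem_singleton.mp hee with rfl
                  simp [heRdef]
            refine ⟨tA.reverse, pari ++ [(nm, (l : Int), (i : Int))], tB.reverse,
              ((text ++ s.2.1) ++ (buf ++ pvRun cs i)) ++ s.2.2, a2, ?_, ?_, ?_⟩
            · have hfa : PySem.Chars.isalnum ')' = false := by decide
              simp [pvScanStepA, hcl, hfa, hoklast, hrs, hokdrop]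
            · have hfa : PySem.Chars.isalnum ')' = false := by decide
              simp [pvStepB, hcl, hfa, hstklast, hget, hrs, hstkdrop]
            · constructor
              · rw [hE', List.reverse_reverse, List.reverse_reverse]
                apply pvRel_mono hrel'
                intro p hp
                exact (hagree p (by omega) (by omega)).symm
              · -- the buffer equation, substitution case
                rw [hE', hrs]
                have hsplit1 := pvOut_split cs E2 hd2 (b - a2) (i + 1 - b) a2 (by
                  intro e he he1 he2
                  rcases List.mem_append.mp he with he | he
                  · rcases hz e he with h | h
                    · push_cast at he2 ⊢; omega
                    · exfalso; push_cast at he2; omega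
                  · exfalso
                    rcases List.mem_cons.mp he with rfl | hee
                    · simp only [heLdef] at he1 he2; push_cast at he2; omega
                    · rcases List.mem_singleton.mp hee with rfl
                      simp only [heRdef] at he1 he2; push_cast at he2; omega)
                have hpart1 : pvOut cs E2 a2 (b - a2) = text := by
                  rw [pvOut_congr cs E2 (pvEditsOf pari) (b - a2) a2 (by
                    intro p hp1 hp2
                    exact hagree p (by omega) (by omega))]
                  rw [← h3]
                have hsplit3 := pvOut_split cs E2 hd2 (i - L - (l+1)) (L + 1) (l+1) (by
                  intro e he he1 he2
                  rcases List.mem_append.mp he with he | he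
                  · have h2 := (hgood e he).2.2
                    push_cast at he2 ⊢; omega
                  · exfalso
                    rcases List.mem_cons.mp he with rfl | hee
                    · simp only [heLdef] at he1; push_cast at he1; omega
                    · rcases List.mem_singleton.mp hee with rfl
                      simp only [heRdef] at he2; push_cast at he2; omega)
                have hpart3a : pvOut cs E2 (l+1) (i - L - (l+1)) = buf := by
                  rw [pvOut_congr cs E2 (pvEditsOf pari) (i - L - (l+1)) (l+1) (by
                    intro p hp1 hp2
                    exact hagree p (by omega) (by omega))]
                  rw [← hbuf]
                have hsplit4 := pvOut_split cs E2 hd2 L 1 (i - L) (by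
                  intro e he he1 he2
                  exfalso
                  rcases List.mem_append.mp he with he | he
                  · have h2 := (hgood e he).2.2
                    have h1 := (hgood e he).1
                    push_cast at he1; omega
                  · rcases List.mem_cons.mp he with rfl | hee
                    · simp only [heLdef] at he1; push_cast at he1; omega
                    · rcases List.mem_singleton.mp hee with rfl
                      simp only [heRdef] at he2; push_cast at he2; omega)
                have hpart4a : pvOut cs E2 (i - L) L = pvRun cs i := by
                  rw [pvOut_congr cs E2 (pvEditsOf pari) L (i - L) (by
                    intro p hp1 hp2
                    exact hagree p (by omega) (by omega))]
                  rw [pvOut_none cs (pvEditsOf pari) L (i - L) (by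
                    intro p hp1 hp2
                    exact hErun p hp1 (by omega)) (by omega)]
                  exact pvRun_slice cs i
                have hpart4b : pvOut cs E2 i 1 = s.2.2 := by
                  rw [pvOut_eq cs E2 i 1 (by omega), hfE2i]
                  simp only [heRdef]
                  rw [show max 1 ((1 : Int)).toNat = 1 from rfl, show (1 : Nat) - 1 = 0 from rfl,
                    pvOut_zero]
                  simp
                have hk : i + 1 - ([] : List Char).length - a2 = (b - a2) + (i + 1 - b) := by
                  simp
                  omega
                rw [hk, hsplit1, show a2 + (b - a2) = b from by omega, hpart1]
                rw [pvOut_eq cs E2 b (i + 1 - b) (by omega), hfE2b]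
                simp only [heLdef]
                rw [show max 1 ((N : Int) + 1).toNat = N + 1 from by omega]
                rw [show b + (N + 1) = l + 1 from by omega,
                  show i + 1 - b - (N + 1) = (i - L - (l+1)) + (L + 1) from by omega]
                rw [hsplit3, show l + 1 + (i - L - (l + 1)) = i - L from by omega, hpart3a]
                rw [hsplit4, show i - L + L = i from by omega, hpart4a, hpart4b]
                simp [List.append_assoc]
              · simp [hrs]; omega
              · rw [hE', hrs]
                intro e he
                rcases List.mem_append.mp he with he | he
                · obtain ⟨g1, g2, g3⟩ := hgood e he
                  refine ⟨g1, g2, ?_⟩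
                  simp only [List.length_nil]
                  omega
                · rcases List.mem_cons.mp he with rfl | hee
                  · simp only [heLdef, List.length_nil]
                    refine ⟨by omega, by omega, by push_cast; omega⟩
                  · rcases List.mem_singleton.mp hee with rfl
                    simp only [heRdef, List.length_nil]
                    refine ⟨by omega, by omega, by push_cast; omega⟩
              · rw [hE']
                intro e he zz hzz
                have hzz2 : zz ∈ tA := List.mem_reverse.mp hzz
                have hzzb := pvRel_bound hrel' zz hzz2
                rcases List.mem_append.mp he with he | he
                · exact hzone e he zz (by rw [hoklv]; exact List.mem_append_left _ hzz)
                · rcases List.mem_cons.mp he with rfl | hee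
                  · right; simp only [heLdef]; omega
                  · rcases List.mem_singleton.mp hee with rfl
                    right; simp only [heRdef]; omega
              · rw [hE']
                rw [List.pairwise_append]
                refine ⟨hdisj, ?_, ?_⟩
                · refine List.pairwise_cons.mpr ⟨?_, by simp⟩
                  intro f hf
                  rcases List.mem_singleton.mp hf with rfl
                  left
                  simp only [heLdef, heRdef]
                  push_cast
                  omega
                · intro e he f hf
                  rcases List.mem_cons.mp hf with rfl | hf2
                  · rcases hz e he with h | h
                    · left; simp only [heLdef]; omega
                    · right; simp only [heLdef]; push_cast; omega
                  · rcases List.mem_singleton.mp hf2 with rfl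
                    left
                    have h2 := (hgood e he).2.2
                    simp only [heRdef]
                    push_cast at h2 ⊢
                    omega
              · rw [hE']
                rw [List.map_append, List.nodup_append]
                refine ⟨hnd, ?_, ?_⟩
                · simp only [heLdef, heRdef, List.map_cons, List.map_nil]
                  rw [List.nodup_cons]
                  refine ⟨?_, List.nodup_singleton _⟩
                  rw [List.mem_singleton]
                  intro hcon
                  omega
                · intro x hx1 y hy
                  obtain ⟨e, he, hex⟩ := List.mem_map.mp hx1
                  have hy2 : y = eL.1 ∨ y = eR.1 := by simpa using hy
                  simp only [heLdef, heRdef] at hy2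
                  intro hcon
                  subst hcon
                  rcases hy2 with h | h
                  · rw [← hex] at h
                    rcases hz e he with hh | hh
                    · have := (hgood e he).1
                      omega
                    · omega
                  · rw [← hex] at h
                    have h2 := (hgood e he).2.2
                    have h1 := (hgood e he).1
                    push_cast at h2
                    omega
              · rw [pvCount_succ cs i hi, pvCount_succ cs i hi, ← hcdef, if_pos hcl,
                  if_neg (by rw [hcl]; decide)]
                rw [hoklv] at hcount
                simp only [List.length_append, List.length_reverse,
                  List.length_singleton] at hcount
                simp only [List.length_reverse]
                omega
        · -- ordinary character
          obtain ⟨hrel, hbuf, hai, hgood, hzone, hdisj, hnd, hcount⟩ := inv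
          have hrs : pvRun cs (i+1) = [] := by
            rw [pvRun_succ, hgd, if_neg hal]
          set L := (pvRun cs i).length with hLdef
          have hd1 : ∀ e ∈ pvEditsOf pari, 1 ≤ e.2.1 := fun e he => (hgood e he).1
          refine ⟨okl, pari, stk, (buf ++ pvRun cs i) ++ [c], a, ?_, ?_, ?_⟩
          · simp [pvScanStepA, hal, hop, hcl, hrs]
          · simp [pvStepB, hal, hop, hcl, hrs]
          · constructor
            · exact hrel
            · -- buffer: old region ++ literal run ++ the character
              have hsplit := pvOut_split cs (pvEditsOf pari) hd1 (i - L - a) (L + 1) a (by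
                intro e he he1 he2
                have := (hgood e he).2.2
                have ha2 : a + (i - L - a) = i - L := by omega
                rw [ha2] at he2 ⊢
                exact this)
              have hnone : ∀ p : Nat, i - L ≤ p → p < (i - L) + (L + 1) →
                  pvFindE (pvEditsOf pari) (p : Int) = none := by
                intro p hp1 hp2
                apply pvFindE_eq_none
                intro e he hcon
                have h2 := (hgood e he).2.2
                have h1 := (hgood e he).1
                rw [hcon] at h2
                push_cast at h2
                omega
              have hmid : pvOut cs (pvEditsOf pari) (i - L) (L + 1)
                  = (cs.drop (i - L)).take (L + 1) := pvOut_none _ _ _ _ hnone (by omega)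
              have htake : (cs.drop (i - L)).take (L + 1) = pvRun cs i ++ [c] := by
                rw [List.take_succ, pvRun_slice]
                congr 1
                rw [List.getElem?_drop, show i - L + L = i from by omega,
                  List.getElem?_eq_getElem hi]
                rfl
              have hk : i + 1 - (pvRun cs (i+1)).length - a = (i - L - a) + (L + 1) := by
                rw [hrs]; simp; omega
              rw [hk, hsplit, show a + (i - L - a) = i - L from by omega, hmid, htake, hbuf,
                List.append_assoc]
            · rw [hrs]; simp; omega
            · intro e he
              obtain ⟨g1, g2, g3⟩ := hgood e he
              refine ⟨g1, g2, ?_⟩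
              have : ((i - L : Nat) : Int) ≤ ((i + 1 - (pvRun cs (i+1)).length : Nat) : Int) := by
                rw [hrs]; simp only [List.length_nil]; omega
              omega
            · exact hzone
            · exact hdisj
            · exact hnd
            · rw [pvCount_succ cs i hi, pvCount_succ cs i hi, ← hcdef, if_neg hop, if_neg hcl]
              omega

lemma pvPairwise_lt (zs : List PvEdit) (hd : ∀ e ∈ zs, 1 ≤ e.2.1)
    (h : zs.Pairwise (fun e f => e.1 + e.2.1 ≤ f.1)) :
    zs.Pairwise (fun e f =>
      (toLex (e.1, toLex (e.2.1, e.2.2))) < (toLex (f.1, toLex (f.2.1, f.2.2)))) := by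
  induction zs with
  | nil => exact List.Pairwise.nil
  | cons e t ih =>
    obtain ⟨h1, h2⟩ := List.pairwise_cons.mp h
    refine List.pairwise_cons.mpr ⟨?_, ih (fun f hf => hd f (by simp [hf])) h2⟩
    intro f hf
    rw [Prod.Lex.toLex_lt_toLex]
    left
    have := h1 f hf
    have := hd e (by simp)
    omega

lemma pvChain_pairwise (n : Nat) : ∀ (zs : List PvEdit) (i : Int), pvChain n i zs →
    zs.Pairwise (fun e f => e.1 + e.2.1 ≤ f.1) := by
  intro zs
  induction zs with
  | nil => intro i _; exact List.Pairwise.nil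
  | cons e t ih =>
    intro i hc
    obtain ⟨h1, h2, h3, h4⟩ := hc
    refine List.pairwise_cons.mpr ⟨?_, ih (e.1 + e.2.1) h4⟩
    intro f hf
    exact (pvChain_starts n t (e.1 + e.2.1) h4 f hf).1

-- ===== VERDICT (by name: the statement is the Claim_ definition above) =====
theorem predelaj_niz_za_latex_spec : Claim_equal_predelaj_niz_za_latex := by
  unfold Claim_equal_predelaj_niz_za_latex
  intro niz _ hpre
  unfold Spec_predelaj_niz_za_latex
  unfold Pre_predelaj_niz_za_latex at hpre
  set cs := niz.toList with hcs
  have hpre' : ∀ k, k ≤ cs.length → (cs.take k).count ')' ≤ (cs.take k).count '(' := by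
    intro k hk
    exact hpre k (List.mem_range.mpr (by omega))
  obtain ⟨okl, pari, stk, buf, a, hA, hB, inv⟩ := pvMain cs hpre' cs.length (le_refl _)
  have hAfull : (PySem.List.enumerate cs).foldl pvScanStepA (some ([], [], []))
      = some (okl, pari, pvRun cs cs.length) := by
    rw [← hA]
    unfold pvScanA
    rw [List.take_of_length_le (by rw [PySem.List.length_enumerate])]
  have hBfull : cs.foldl pvStepB (some ([], [], [])) = some (stk, buf, pvRun cs cs.length) := by
    rw [← hB]
    unfold pvScanB
    rw [List.take_of_length_le (le_refl _)]
  obtain ⟨hrel, hbuf, hai, hgood, hzone, hdisj, hnd, hcount⟩ := inv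
  set E := pvEditsOf pari with hE
  set n := cs.length with hn
  set L := (pvRun cs n).length with hL
  have hd1 : ∀ e ∈ E, 1 ≤ e.2.1 := fun e he => (hgood e he).1
  -- B's final value is the full spliced output
  have hinner : buf ++ pvRun cs n = pvOut cs E a (n - a) := by
    have hsplit := pvOut_split cs E hd1 (n - L - a) L a (by
      intro e he he1 he2
      have := (hgood e he).2.2
      push_cast at he2 ⊢
      omega)
    have hlit : pvOut cs E (n - L) L = pvRun cs n := by
      rw [pvOut_none cs E L (n - L) (by
        intro p hp1 hp2
        apply pvFindE_eq_none
        intro e he hcon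
        have h2 := (hgood e he).2.2
        have h1 := (hgood e he).1
        rw [hcon] at h2
        push_cast at h2
        omega) (by omega)]
      exact pvRun_slice cs n
    have hk : n - a = (n - L - a) + L := by omega
    rw [hk, hsplit, show a + (n - L - a) = n - L from by omega, hlit, hbuf]
  have hflat := pvRel_flatten cs E hd1 hrel
    (fun e he z hz => hzone e he z (List.mem_reverse.mp hz))
    (buf ++ pvRun cs n) hinner (by omega)
  -- the sorted edit list
  set key : PvEdit → Lex (Int × Lex (Int × List Char)) :=
    fun e => toLex (e.1, toLex (e.2.1, e.2.2)) with hkey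
  set ys : List PvEdit := E.mergeSort (fun e f => decide (e.1 ≤ f.1)) with hys
  have hperm : ys.Perm E := List.mergeSort_perm E _
  have hple : ys.Pairwise (fun e f => e.1 ≤ f.1) := by
    have := List.sorted_mergeSort (le := fun e f : PvEdit => decide (e.1 ≤ f.1))
      (fun a b c hab hbc => by simp at hab hbc ⊢; omega)
      (fun a b => by simp; omega) E
    exact this.imp (fun h => by simpa using h)
  have hdisjys : ys.Pairwise (fun e f => e.1 + e.2.1 ≤ f.1 ∨ f.1 + f.2.1 ≤ e.1) := by
    refine (List.Perm.pairwise_iff ?_ hperm).mpr hdisj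
    intro x y h
    exact h.symm
  have hmemys : ∀ e ∈ ys, e ∈ E := fun e he => hperm.subset he
  have hchain : pvChain n 0 ys := by
    apply pvChain_of_sorted n ys 0 hple hdisjys
    · intro e he
      obtain ⟨g1, g2, g3⟩ := hgood e (hmemys e he)
      refine ⟨g1, by omega⟩
    · intro e he
      exact (hgood e (hmemys e he)).2.1
  have hdys : ∀ e ∈ ys, 1 ≤ e.2.1 := fun e he => hd1 e (hmemys e he)
  have hlt : ys.Pairwise (fun e f => key e < key f) :=
    pvPairwise_lt ys hdys (pvChain_pairwise n ys 0 hchain)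
  have hsorted : PySem.List.sorted E key = ys :=
    PySem.List.sorted_eq_of_perm_of_pairwise_lt E ys key hperm hlt
  have hndys : (ys.map (·.1)).Nodup := ((hperm.map (·.1)).nodup_iff).mpr hnd
  have hcongr : pvOut cs ys 0 n = pvOut cs E 0 n := by
    apply pvOut_congr
    intro p _ _
    exact pvFindE_perm hperm hndys (p : Int)
  have hchain0 : pvChain cs.length ((0 : Nat) : Int) ys := by
    rw [Nat.cast_zero]
    exact hchain
  have hout := pvChain_out cs ys 0 hchain0 (by omega)
  have hfold := pvFold_splice cs ys 0 [] hchain0 (by omega)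
  rw [Nat.cast_zero] at hfold
  -- assemble
  show predelaj_niz_za_latex niz = predelaj_niz_za_latex_alt niz
  unfold predelaj_niz_za_latex predelaj_niz_za_latex_alt
  rw [← hcs, hAfull, hBfull]
  simp only
  rw [← hE, hsorted, hfold, List.nil_append, ← hout,
    show cs.length - 0 = n from rfl, hcongr, hflat]
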